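-- pv_equiv track=rewrite | github.com/mohammadfaiizan/ProjectI | DSA/Dynamic_Programming/013_dp_bitmasking.py | min_partition_difference
-- ===== SOURCE A (Python) =====
-- from typing import List, Dict, Tuple, Optional, Set
--
-- def min_partition_difference(nums: List[int]) -> int:
--     """
--     Minimum difference between two subset sums
--
--     Args:
--         nums: Array of positive integers
--
--     Returns:
--         Minimum possible difference between subset sums
--     """
--     total_sum = sum(nums)
--     n = len(nums)
--
--     # dp[mask] = True if subset sum represented by mask is possible
--     dp = [False] * (1 << n)
--     dp[0] = True
--
--     subset_sums = set([0])
--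
--     for mask in range(1 << n):
--         if not dp[mask]:
--             continue
--
--         current_sum = sum(nums[i] for i in range(n) if mask & (1 << i))
--         subset_sums.add(current_sum)
--
--         for i in range(n):
--             if not (mask & (1 << i)):
--                 new_mask = mask | (1 << i)
--                 dp[new_mask] = True
--
--     min_diff = float('inf')
--     for sum1 in subset_sums:
--         sum2 = total_sum - sum1
--         min_diff = min(min_diff, abs(sum1 - sum2))
--
--     return min_diff
-- ===== SOURCE B (Python) =====
-- def min_partition_difference(nums):
--     """
--     Minimum difference between two subset sums.
--
--     Subset-sum DP over the set of reachable sums (no bitmask enumeration):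
--     each element either extends an existing reachable sum or not.
--     """
--     total = sum(nums)
--     sums = {0}
--     for x in nums:
--         sums |= {s + x for s in sums}
--     return min(abs(2 * s - total) for s in sums)
-- ===== Notes on version B (the rewrite author's own statement) =====
-- stated objective: faster
-- what changed: Replaces the O(2^n) bitmask enumeration (a dp array over all masks plus an inner per-bit loop) by a one-pass subset-sum DP over the set of reachable sums, then takes min |2s - total| directly.
import Mathlib
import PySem

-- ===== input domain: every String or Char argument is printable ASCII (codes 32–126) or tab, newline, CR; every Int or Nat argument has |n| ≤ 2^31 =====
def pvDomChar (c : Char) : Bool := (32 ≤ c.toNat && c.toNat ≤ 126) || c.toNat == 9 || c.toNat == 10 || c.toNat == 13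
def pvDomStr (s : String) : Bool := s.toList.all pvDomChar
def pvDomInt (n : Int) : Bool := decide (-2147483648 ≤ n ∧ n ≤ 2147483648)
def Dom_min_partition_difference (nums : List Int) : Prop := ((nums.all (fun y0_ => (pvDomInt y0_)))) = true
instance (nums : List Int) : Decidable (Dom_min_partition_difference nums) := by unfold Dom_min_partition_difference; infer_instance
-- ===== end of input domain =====

-- B replaces A's O(2^n) bitmask enumeration by a one-pass subset-sum DP over the set of
-- reachable sums (objective: faster, asymptotically on positive inputs).

-- ===== PORT A =====
-- current_sum = sum(nums[i] for i in range(n) if mask & (1 << i)); nums[i] with 0 ≤ i < len nums is exact as getD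
def pvMaskSum (nums : List Int) (n : Nat) (mask : Nat) : Int :=
  (List.range n).foldl (fun acc i => if mask.testBit i then acc + nums.getD i 0 else acc) 0

-- one iteration of 'for mask in range(1 << n)': skip if not dp[mask], else add current_sum
-- to subset_sums and set dp[mask | (1 << i)] = True for every unset bit i
def pvAStep (nums : List Int) (n : Nat) (st : List Bool × PySem.Set Int) (mask : Nat) :
    List Bool × PySem.Set Int :=
  if st.1.getD mask false = false then st
  else
    ((List.range n).foldl
        (fun dp i => if mask.testBit i then dp else dp.set (mask ||| (1 <<< i)) true) st.1,
      PySem.Set.add st.2 (pvMaskSum nums n mask))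

-- running min starting from float('inf'): 'none' plays infinity (the set always holds 0,
-- so the none branch of the final match is never the result)
def pvRunMin (total : Int) (l : List Int) : Option Int :=
  l.foldl (fun m s =>
    some (match m with
          | none => |s - (total - s)|
          | some v => min v (|s - (total - s)|))) none

def min_partition_difference (nums : List Int) : Int :=
  let total := nums.foldl (· + ·) 0
  let n := nums.length
  let dp0 : List Bool := (List.replicate (1 <<< n) false).set 0 true
  let st := (List.range (1 <<< n)).foldl (pvAStep nums n) (dp0, PySem.Set.ofList [0])
  match pvRunMin total st.2 with
  | some v => v
  | none => 0

-- ===== PORT B =====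
def min_partition_difference_alt (nums : List Int) : Int :=
  let total := nums.foldl (· + ·) 0
  -- sums = {0}; for x in nums: sums |= {s + x for s in sums}
  let sums := nums.foldl (fun ss x => PySem.Set.union ss (ss.map (fun s => s + x)))
      (PySem.Set.ofList [0])
  -- min(abs(2*s - total) for s in sums); the set holds 0, so never none
  match PySem.List.min? (sums.map (fun s => |2 * s - total|)) (fun y => y) with
  | some v => v
  | none => 0

-- ===== PRECONDITION & SPEC =====
def Spec_min_partition_difference (nums : List Int) (out : Int) : Prop := out = min_partition_difference_alt nums
instance (nums : List Int) (out : Int) : Decidable (Spec_min_partition_difference nums out) := by unfold Spec_min_partition_difference; infer_instance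

-- ===== CLAIM (what is proved, stated in full; the proofs are below) =====
def Claim_equal_min_partition_difference : Prop := ∀ (nums : List Int), Dom_min_partition_difference nums → Spec_min_partition_difference nums (min_partition_difference nums)

-- ===== LEMMAS AND PROOFS =====

-- ---- generic bit lemmas ----
lemma pvShift (i : Nat) : 1 <<< i = 2 ^ i := by simp [Nat.shiftLeft_eq]

lemma pvXorLt (k i : Nat) (h : k.testBit i = true) : k ^^^ (1 <<< i) < k := by
  apply Nat.lt_of_testBit i
  · simp [Nat.testBit_xor, h, Nat.shiftLeft_eq]
  · exact h
  · intro j hj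
    simp [Nat.testBit_xor, Nat.shiftLeft_eq, Nat.ne_of_lt hj]

lemma pvBitLtOfLt (k n i : Nat) (h : k < 2 ^ n) (hi : k.testBit i = true) : i < n := by
  by_contra hn
  rw [not_lt] at hn
  have := Nat.testBit_lt_two_pow (lt_of_lt_of_le h (Nat.pow_le_pow_right (by norm_num) hn))
  simp [this] at hi

lemma pvOrXor (k i : Nat) (h : k.testBit i = false) : (k ||| (1 <<< i)) ^^^ (1 <<< i) = k := by
  apply Nat.eq_of_testBit_eq
  intro t
  rcases eq_or_ne t i with rfl | ht
  · simp [Nat.testBit_xor, Nat.testBit_or, Nat.shiftLeft_eq, h]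
  · simp [Nat.testBit_xor, Nat.testBit_or, Nat.shiftLeft_eq, Ne.symm ht]

lemma pvXorOr (j i : Nat) (h : j.testBit i = true) : (j ^^^ (1 <<< i)) ||| (1 <<< i) = j := by
  apply Nat.eq_of_testBit_eq
  intro t
  rcases eq_or_ne t i with rfl | ht
  · simp [Nat.testBit_xor, Nat.testBit_or, Nat.shiftLeft_eq, h]
  · simp [Nat.testBit_xor, Nat.testBit_or, Nat.shiftLeft_eq, Ne.symm ht]

lemma pvTestBitOrSelf (k i : Nat) : (k ||| (1 <<< i)).testBit i = true := by
  simp [Nat.testBit_or, Nat.shiftLeft_eq]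

lemma pvGetDSet (l : List Bool) (i j : Nat) (v d : Bool) :
    (l.set i v).getD j d = if j = i ∧ i < l.length then v else l.getD j d := by
  simp [List.getD, List.getElem?_set]
  split_ifs <;> simp_all

-- ---- pvMaskSum facts ----
lemma pvMaskSum_congr (nums : List Int) (k : Nat) (m1 m2 : Nat)
    (h : ∀ i < k, m1.testBit i = m2.testBit i) : pvMaskSum nums k m1 = pvMaskSum nums k m2 := by
  unfold pvMaskSum
  apply PySem.List.foldl_congr_mem
  intro acc i hi
  rw [h i (List.mem_range.mp hi)]

lemma pvMaskSum_succ (nums : List Int) (k m : Nat) :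
    pvMaskSum nums (k + 1) m
      = pvMaskSum nums k m + (if m.testBit k then nums.getD k 0 else 0) := by
  unfold pvMaskSum
  rw [List.range_succ, List.foldl_append]
  split_ifs with h <;> simp [h]

lemma pvMaskSum_append (l : List Int) (a : Int) (k m : Nat) (h : k ≤ l.length) :
    pvMaskSum (l ++ [a]) k m = pvMaskSum l k m := by
  unfold pvMaskSum
  apply PySem.List.foldl_congr_mem
  intro acc i hi
  have hi' : i < l.length := lt_of_lt_of_le (List.mem_range.mp hi) h
  simp [List.getD, List.getElem?_append, hi']

lemma pvMaskSum_zero (nums : List Int) (k : Nat) : pvMaskSum nums k 0 = 0 := by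
  unfold pvMaskSum
  induction (List.range k) with
  | nil => rfl
  | cons x t _ => simp [Nat.zero_testBit]

-- ---- B-side set membership ----
def pvBSums (nums : List Int) : PySem.Set Int :=
  nums.foldl (fun ss x => PySem.Set.union ss (ss.map (fun s => s + x))) (PySem.Set.ofList [0])

lemma pvMemB (nums : List Int) (x : Int) :
    x ∈ pvBSums nums ↔ ∃ m, m < 2 ^ nums.length ∧ pvMaskSum nums nums.length m = x := by
  induction nums using List.reverseRecOn generalizing x with
  | nil =>
    have h0 : pvBSums [] = [0] := rfl
    rw [h0]
    constructor
    · intro h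
      rcases List.mem_singleton.mp h with rfl
      exact ⟨0, by norm_num, pvMaskSum_zero [] 0⟩
    · rintro ⟨m, hm, hs⟩
      obtain rfl : m = 0 := by simp at hm; omega
      rw [← hs, pvMaskSum_zero]
      exact List.mem_singleton.mpr rfl
  | append_singleton l a ih =>
    have hstep : pvBSums (l ++ [a])
        = PySem.Set.union (pvBSums l) ((pvBSums l).map (fun s => s + a)) := by
      simp [pvBSums, List.foldl_append]
    have hlen : (l ++ [a]).length = l.length + 1 := by simp
    rw [hstep, PySem.Set.mem_union, hlen]
    have hgetD : (l ++ [a]).getD l.length 0 = a := by simp [List.getD]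
    constructor
    · rintro (h | h)
      · rcases (ih x).mp h with ⟨m, hm, hs⟩
        refine ⟨m, lt_trans hm (Nat.pow_lt_pow_right one_lt_two (Nat.lt_succ_self _)), ?_⟩
        have htb : m.testBit l.length = false := Nat.testBit_lt_two_pow hm
        rw [pvMaskSum_succ, htb, if_neg (by simp), add_zero,
          pvMaskSum_append l a l.length m le_rfl, hs]
      · rcases List.mem_map.mp h with ⟨s, hsmem, hsx⟩
        rcases (ih s).mp hsmem with ⟨m, hm, hs⟩
        refine ⟨m ||| (1 <<< l.length), ?_, ?_⟩
        · rw [pvShift]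
          exact Nat.or_lt_two_pow
            (lt_trans hm (Nat.pow_lt_pow_right one_lt_two (Nat.lt_succ_self _)))
            (Nat.pow_lt_pow_right one_lt_two (Nat.lt_succ_self _))
        · have htb : (m ||| (1 <<< l.length)).testBit l.length = true := pvTestBitOrSelf ..
          rw [pvMaskSum_succ, htb, if_pos rfl, hgetD,
            pvMaskSum_append l a l.length _ le_rfl]
          have hcg : pvMaskSum l l.length (m ||| (1 <<< l.length)) = pvMaskSum l l.length m := by
            apply pvMaskSum_congr
            intro i hik
            simp [Nat.testBit_or, Nat.shiftLeft_eq, Nat.ne_of_gt hik]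
          rw [hcg, hs, hsx]
    · rintro ⟨m, hm, hs⟩
      have hmod : m % 2 ^ l.length < 2 ^ l.length := Nat.mod_lt _ (Nat.two_pow_pos _)
      have hcg : pvMaskSum l l.length m = pvMaskSum l l.length (m % 2 ^ l.length) := by
        apply pvMaskSum_congr
        intro i hik
        simp [Nat.testBit_mod_two_pow, hik]
      rw [pvMaskSum_succ, pvMaskSum_append l a l.length m le_rfl, hgetD, hcg] at hs
      by_cases htb : m.testBit l.length
      · right
        refine List.mem_map.mpr ⟨pvMaskSum l l.length (m % 2 ^ l.length),
          (ih _).mpr ⟨m % 2 ^ l.length, hmod, rfl⟩, ?_⟩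
        rw [← hs, htb, if_pos rfl]
      · left
        refine (ih x).mpr ⟨m % 2 ^ l.length, hmod, ?_⟩
        rw [← hs]
        simp [htb]

-- ---- A-side loop invariant ----
def pvALoop (nums : List Int) (n k : Nat) : List Bool × PySem.Set Int :=
  (List.range k).foldl (pvAStep nums n)
    ((List.replicate (1 <<< n) false).set 0 true, PySem.Set.ofList [0])

lemma pvDpUpd_length (mask : Nat) (l : List Nat) (dp : List Bool) :
    (l.foldl (fun dp i => if mask.testBit i then dp else dp.set (mask ||| (1 <<< i)) true)
        dp).length = dp.length := by
  induction l generalizing dp with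
  | nil => rfl
  | cons x t ih =>
    simp only [List.foldl_cons]
    split_ifs <;> simp [ih]

lemma pvDpUpd_getD (mask : Nat) (l : List Nat) (dp : List Bool) (j : Nat) :
    ((l.foldl (fun dp i => if mask.testBit i then dp else dp.set (mask ||| (1 <<< i)) true)
        dp).getD j false = true)
    ↔ (dp.getD j false = true
        ∨ ∃ i ∈ l, mask.testBit i = false ∧ j = mask ||| (1 <<< i) ∧ j < dp.length) := by
  induction l generalizing dp with
  | nil => simp
  | cons x t ih =>
    simp only [List.foldl_cons]
    by_cases hx : mask.testBit x
    · rw [if_pos hx, ih]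
      constructor
      · rintro (h | ⟨i, hi, hh⟩)
        · exact Or.inl h
        · exact Or.inr ⟨i, List.mem_cons_of_mem _ hi, hh⟩
      · rintro (h | ⟨i, hi, hf, hh⟩)
        · exact Or.inl h
        · rcases List.mem_cons.mp hi with rfl | hi
          · rw [hx] at hf; cases hf
          · exact Or.inr ⟨i, hi, hf, hh⟩
    · rw [if_neg hx, ih]
      rw [pvGetDSet]
      rw [List.length_set]
      constructor
      · rintro (h | ⟨i, hi, hf, hj, hl⟩)
        · split_ifs at h with hc
          · exact Or.inr ⟨x, List.mem_cons_self, by simpa using hx, hc.1, hc.1 ▸ hc.2⟩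
          · exact Or.inl h
        · exact Or.inr ⟨i, List.mem_cons_of_mem _ hi, hf, hj, hl⟩
      · rintro (h | ⟨i, hi, hf, hj, hl⟩)
        · left; split_ifs with hc
          · rfl
          · exact h
        · rcases List.mem_cons.mp hi with rfl | hi
          · left; rw [if_pos ⟨hj, hj ▸ hl⟩]
          · exact Or.inr ⟨i, hi, hf, hj, hl⟩

lemma pvALoop_inv (nums : List Int) (n k : Nat) (hk : k ≤ 2 ^ n) :
    (pvALoop nums n k).1.length = 2 ^ n
    ∧ (∀ j : Nat, ((pvALoop nums n k).1.getD j false = true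
        ↔ (j = 0 ∨ (j < 2 ^ n ∧ ∃ i < n, j.testBit i = true ∧ j ^^^ (1 <<< i) < k))))
    ∧ (∀ x : Int, (x ∈ (pvALoop nums n k).2
        ↔ (x = 0 ∨ ∃ m < k, pvMaskSum nums n m = x))) := by
  induction k with
  | zero =>
    refine ⟨?_, ?_, ?_⟩
    · simp [pvALoop, pvShift]
    · intro j
      simp only [pvALoop, List.range_zero, List.foldl_nil]
      rw [pvGetDSet]
      have hrep : (List.replicate (1 <<< n) false).getD j false = false := by
        simp [List.getD, List.getElem?_replicate]
        split <;> rfl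
      constructor
      · intro h
        split_ifs at h with hc
        · exact Or.inl hc.1
        · rw [hrep] at h
          cases h
      · rintro (rfl | ⟨_, _, _, _, hlt⟩)
        · rw [if_pos ⟨rfl, by simp [pvShift]⟩]
        · exact absurd hlt (Nat.not_lt_zero _)
    · intro x
      simp [pvALoop]
  | succ k ih =>
    have hklt : k < 2 ^ n := hk
    obtain ⟨hlen, hdp, hss⟩ := ih (le_of_lt hklt)
    have hrec : pvALoop nums n (k + 1) = pvAStep nums n (pvALoop nums n k) k := by
      simp [pvALoop, List.range_succ]
    have hbit : k = 0 ∨ ∃ i, k.testBit i = true := by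
      by_cases h0 : k = 0
      · exact Or.inl h0
      · right
        by_contra hno
        have hall : ∀ i, k.testBit i = false := by
          intro i
          by_contra hbad
          exact hno ⟨i, by simpa using hbad⟩
        exact h0 (Nat.eq_of_testBit_eq (fun i => by simp [hall i, Nat.zero_testBit]))
    have hguard : (pvALoop nums n k).1.getD k false = true := by
      rw [hdp k]
      rcases hbit with rfl | ⟨i, hi⟩
      · exact Or.inl rfl
      · exact Or.inr ⟨hklt, i, pvBitLtOfLt k n i hklt hi, hi, pvXorLt k i hi⟩
    rw [hrec]
    unfold pvAStep
    rw [if_neg (fun hfalse => by rw [hfalse] at hguard; simp at hguard)]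
    refine ⟨?_, ?_, ?_⟩
    · rw [pvDpUpd_length]
      exact hlen
    · intro j
      rw [pvDpUpd_getD, hdp j, hlen]
      constructor
      · rintro ((rfl | ⟨hj2, i, hin, htb, hlt⟩) | ⟨i, hi, hfk, rfl, hj2⟩)
        · exact Or.inl rfl
        · exact Or.inr ⟨hj2, i, hin, htb, Nat.lt_succ_of_lt hlt⟩
        · refine Or.inr ⟨hj2, i, List.mem_range.mp hi, pvTestBitOrSelf .., ?_⟩
          rw [pvOrXor k i hfk]
          exact Nat.lt_succ_self k
      · rintro (rfl | ⟨hj2, i, hin, htb, hlt⟩)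
        · exact Or.inl (Or.inl rfl)
        · rcases Nat.lt_succ_iff_lt_or_eq.mp hlt with hlt' | heq
          · exact Or.inl (Or.inr ⟨hj2, i, hin, htb, hlt'⟩)
          · right
            refine ⟨i, List.mem_range.mpr hin, ?_, ?_, hj2⟩
            · rw [← heq]
              simp [Nat.testBit_xor, Nat.shiftLeft_eq, htb]
            · rw [← heq, pvXorOr j i htb]
    · intro x
      rw [PySem.Set.mem_add, hss x]
      constructor
      · rintro ((rfl | ⟨m, hm, hs⟩) | rfl)
        · exact Or.inl rfl
        · exact Or.inr ⟨m, Nat.lt_succ_of_lt hm, hs⟩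
        · exact Or.inr ⟨k, Nat.lt_succ_self k, rfl⟩
      · rintro (rfl | ⟨m, hm, hs⟩)
        · exact Or.inl (Or.inl rfl)
        · rcases Nat.lt_succ_iff_lt_or_eq.mp hm with hm' | rfl
          · exact Or.inl (Or.inr ⟨m, hm', hs⟩)
          · exact Or.inr hs.symm

lemma pvASet_mem (nums : List Int) (n : Nat) (x : Int) :
    x ∈ (pvALoop nums n (2 ^ n)).2 ↔ ∃ m < 2 ^ n, pvMaskSum nums n m = x := by
  rw [(pvALoop_inv nums n (2 ^ n) le_rfl).2.2]
  constructor
  · rintro (rfl | h)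
    · exact ⟨0, Nat.two_pow_pos n, pvMaskSum_zero nums n⟩
    · exact h
  · exact Or.inr

-- ---- min-fold facts ----
lemma pvRunMin_some (total : Int) :
    ∀ (l : List Int) (a : Int),
      l.foldl (fun m s =>
        some (match m with
              | none => |s - (total - s)|
              | some v => min v (|s - (total - s)|))) (some a)
      = some ((l.map (fun s => |s - (total - s)|)).foldl min a) := by
  intro l
  induction l with
  | nil => intro a; rfl
  | cons x t ih => intro a; simp [ih]

lemma pvRunMin_cons (total : Int) (x : Int) (t : List Int) :
    pvRunMin total (x :: t)
      = some ((t.map (fun s => |s - (total - s)|)).foldl min (|x - (total - x)|)) := by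
  unfold pvRunMin
  simp [pvRunMin_some total t]

lemma pvFoldlMin_mem (l : List Int) (a : Int) : l.foldl min a ∈ a :: l := by
  induction l generalizing a with
  | nil => simp
  | cons x t ih =>
    simp only [List.foldl_cons]
    rcases List.mem_cons.mp (ih (min a x)) with h | h
    · rcases min_choice a x with hc | hc <;> rw [h, hc] <;> simp
    · simp [h]

lemma pvFoldlMin_le (l : List Int) (a : Int) : ∀ y ∈ a :: l, l.foldl min a ≤ y := by
  induction l generalizing a with
  | nil => simp
  | cons x t ih =>
    intro y hy
    simp only [List.foldl_cons]
    rcases List.mem_cons.mp hy with rfl | hy'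
    · exact le_trans (ih _ _ (List.mem_cons_self)) (min_le_left _ _)
    · rcases List.mem_cons.mp hy' with rfl | hy'' 
      · exact le_trans (ih _ _ (List.mem_cons_self)) (min_le_right _ _)
      · exact ih _ _ (List.mem_cons_of_mem _ hy'')

lemma pvMinList_congr (x1 x2 : Int) (t1 t2 : List Int)
    (h : ∀ y, y ∈ x1 :: t1 ↔ y ∈ x2 :: t2) : t1.foldl min x1 = t2.foldl min x2 := by
  apply le_antisymm
  · exact pvFoldlMin_le t1 x1 _ ((h _).mpr (pvFoldlMin_mem t2 x2))
  · exact pvFoldlMin_le t2 x2 _ ((h _).mp (pvFoldlMin_mem t1 x1))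

lemma pvMinMap_eq (g : Int → Int) (a b : Int) (tA tB : List Int)
    (h : ∀ y, y ∈ a :: tA ↔ y ∈ b :: tB) :
    (tA.map g).foldl min (g a) = (tB.map g).foldl min (g b) := by
  apply pvMinList_congr
  intro y
  rw [← List.map_cons, ← List.map_cons, List.mem_map, List.mem_map]
  constructor <;> rintro ⟨s, hs, rfl⟩
  · exact ⟨s, (h s).mp hs, rfl⟩
  · exact ⟨s, (h s).mpr hs, rfl⟩

lemma pvPorts_eq (nums : List Int) :
    min_partition_difference nums = min_partition_difference_alt nums := by
  have hA : min_partition_difference nums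
      = (match pvRunMin (nums.foldl (· + ·) 0)
            (pvALoop nums nums.length (2 ^ nums.length)).2 with
         | some v => v
         | none => 0) := by
    rw [← pvShift]
    rfl
  have hB : min_partition_difference_alt nums
      = (match PySem.List.min?
            ((pvBSums nums).map (fun s => |2 * s - nums.foldl (· + ·) 0|)) (fun y => y) with
         | some v => v
         | none => 0) := rfl
  rw [hA, hB]
  have h0A : (0 : Int) ∈ (pvALoop nums nums.length (2 ^ nums.length)).2 :=
    (pvASet_mem nums nums.length 0).mpr ⟨0, Nat.two_pow_pos _, pvMaskSum_zero _ _⟩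
  have h0B : (0 : Int) ∈ pvBSums nums :=
    (pvMemB nums 0).mpr ⟨0, Nat.two_pow_pos _, pvMaskSum_zero _ _⟩
  have hmem : ∀ y : Int,
      y ∈ (pvALoop nums nums.length (2 ^ nums.length)).2 ↔ y ∈ pvBSums nums := fun y => by
    rw [pvASet_mem, pvMemB]
  obtain ⟨a, tA, hAeq⟩ : ∃ a t, (pvALoop nums nums.length (2 ^ nums.length)).2 = a :: t := by
    cases hc : (pvALoop nums nums.length (2 ^ nums.length)).2 with
    | nil => rw [hc] at h0A; cases h0A
    | cons a t => exact ⟨a, t, rfl⟩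
  obtain ⟨b, tB, hBeq⟩ : ∃ b t, pvBSums nums = b :: t := by
    cases hc : pvBSums nums with
    | nil => rw [hc] at h0B; cases h0B
    | cons b t => exact ⟨b, t, rfl⟩
  rw [hAeq, hBeq, pvRunMin_cons, List.map_cons, PySem.List.min?_id_cons]
  dsimp only
  have hfg : ∀ s : Int, |s - (nums.foldl (· + ·) 0 - s)| = |2 * s - nums.foldl (· + ·) 0| :=
    fun s => congrArg abs (by ring)
  simp only [hfg]
  refine pvMinMap_eq (fun s => |2 * s - List.foldl (fun x1 x2 => x1 + x2) 0 nums|) a b tA tB ?_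
  intro y
  rw [← hAeq, ← hBeq]
  exact hmem y

-- ===== VERDICT (by name: the statement is the Claim_ definition above) =====
theorem min_partition_difference_spec : Claim_equal_min_partition_difference := by
  intro nums _
  show min_partition_difference nums = min_partition_difference_alt nums
  exact pvPorts_eq nums
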